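-- pv_equiv track=rewrite | github.com/pypi-data/pypi-mirror-78 | packages/fba/fba-0.0.2.dev0-py3-none-any.whl/fba/map.py | get_indel_count_from_cigar
-- ===== SOURCE A (Python) =====
-- def get_indel_count_from_cigar(cigartuples):
--     """
--     """
--     num_insertions = [i[1] for i in cigartuples if i[0] == 1]
--     num_deletions = [i[1] for i in cigartuples if i[0] == 2]
--
--     if num_insertions:
--         num_insertions = num_insertions[0]
--     else:
--         num_insertions = 0
--
--     if num_deletions:
--         num_deletions = num_deletions[0]
--     else:
--         num_deletions = 0
--
--     return num_insertions, num_deletions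
-- ===== SOURCE B (Python) =====
-- def get_indel_count_from_cigar(cigartuples):
--     num_insertions = 0
--     num_deletions = 0
--     found_ins = False
--     found_del = False
--     for op, length in cigartuples:
--         if op == 1 and not found_ins:
--             num_insertions = length
--             found_ins = True
--         if op == 2 and not found_del:
--             num_deletions = length
--             found_del = True
--         if found_ins and found_del:
--             break
--     return num_insertions, num_deletions
-- ===== Notes on version B (the rewrite author's own statement) =====
-- stated objective: alternative
-- what changed: Replaces A's two full filtering comprehensions with a single early-exiting pass that records the first insertion and deletion lengths via found-flags.
import Mathlib
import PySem

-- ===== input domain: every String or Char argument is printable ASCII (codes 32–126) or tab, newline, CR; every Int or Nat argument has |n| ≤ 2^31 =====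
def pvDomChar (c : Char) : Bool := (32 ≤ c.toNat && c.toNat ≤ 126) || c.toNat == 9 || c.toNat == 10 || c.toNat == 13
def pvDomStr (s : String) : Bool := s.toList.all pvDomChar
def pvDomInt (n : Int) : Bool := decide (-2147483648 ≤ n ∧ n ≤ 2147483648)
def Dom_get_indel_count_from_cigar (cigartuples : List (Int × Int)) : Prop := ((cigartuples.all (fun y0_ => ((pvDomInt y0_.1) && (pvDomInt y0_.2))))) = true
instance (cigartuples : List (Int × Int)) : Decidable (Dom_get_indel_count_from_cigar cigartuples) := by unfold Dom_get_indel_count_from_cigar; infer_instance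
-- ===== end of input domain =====

-- B replaces A's two filtering comprehensions by one early-exiting pass with found-flags (objective: alternative).
-- ===== PORT A =====
def get_indel_count_from_cigar (cigartuples : List (Int × Int)) : Int × Int :=
  let num_insertions := (cigartuples.filter (fun i => i.1 == 1)).map (fun i => i.2)
  let num_deletions := (cigartuples.filter (fun i => i.1 == 2)).map (fun i => i.2)
  let ni := match num_insertions with
    | x :: _ => x
    | [] => 0
  let nd := match num_deletions with
    | x :: _ => x
    | [] => 0
  (ni, nd)

-- ===== PORT B =====
def pvAltLoop : List (Int × Int) → Int → Int → Bool → Bool → Int × Int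
  | [], ins, del, _, _ => (ins, del)
  | (op, len) :: rest, ins, del, fi, fd =>
    let ins' := if op == 1 && !fi then len else ins
    let fi'  := if op == 1 && !fi then true else fi
    let del' := if op == 2 && !fd then len else del
    let fd'  := if op == 2 && !fd then true else fd
    if fi' && fd' then (ins', del') else pvAltLoop rest ins' del' fi' fd'

def get_indel_count_from_cigar_alt (cigartuples : List (Int × Int)) : Int × Int :=
  pvAltLoop cigartuples 0 0 false false

-- ===== PRECONDITION & SPEC =====
def Spec_get_indel_count_from_cigar (cigartuples : List (Int × Int)) (out : Int × Int) : Prop := out = get_indel_count_from_cigar_alt cigartuples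
instance (cigartuples : List (Int × Int)) (out : Int × Int) : Decidable (Spec_get_indel_count_from_cigar cigartuples out) := by unfold Spec_get_indel_count_from_cigar; infer_instance

-- ===== CLAIM (what is proved, stated in full; the proofs are below) =====
def Claim_equal_get_indel_count_from_cigar : Prop := ∀ (cigartuples : List (Int × Int)), Dom_get_indel_count_from_cigar cigartuples → Spec_get_indel_count_from_cigar cigartuples (get_indel_count_from_cigar cigartuples)

-- ===== LEMMAS AND PROOFS =====
theorem pvAltLoop_eq (xs : List (Int × Int)) : ∀ (ins del : Int) (fi fd : Bool),
    pvAltLoop xs ins del fi fd =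
      ((if fi then ins else (((xs.filter (fun i => i.1 == 1)).map (fun i => i.2)).headD ins)),
       (if fd then del else (((xs.filter (fun i => i.1 == 2)).map (fun i => i.2)).headD del))) := by
  induction xs with
  | nil => intro ins del fi fd; simp [pvAltLoop]
  | cons hd tl ih =>
    intro ins del fi fd
    obtain ⟨op, len⟩ := hd
    simp only [pvAltLoop]
    by_cases h1 : op = 1 <;> by_cases h2 : op = 2 <;>
      cases fi <;> cases fd <;>
      simp [h1, h2, ih]

theorem get_indel_count_from_cigar_eq (xs : List (Int × Int)) :
    get_indel_count_from_cigar xs = get_indel_count_from_cigar_alt xs := by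
  rw [get_indel_count_from_cigar_alt, pvAltLoop_eq]
  simp only [get_indel_count_from_cigar, if_neg Bool.false_ne_true]
  cases h1 : (xs.filter (fun i => i.1 == 1)).map (fun i => i.2) <;>
    cases h2 : (xs.filter (fun i => i.1 == 2)).map (fun i => i.2) <;>
    simp

-- ===== VERDICT (by name: the statement is the Claim_ definition above) =====
theorem get_indel_count_from_cigar_spec : Claim_equal_get_indel_count_from_cigar := by
  intro xs _
  exact get_indel_count_from_cigar_eq xs
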